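-- pv_equiv track=rewrite | github.com/BU-DiSC/SSD-Benchmark | parser/helper.py | valiurl
-- ===== SOURCE A (Python) =====
-- def valiurl(inputurl):
--     inputurl = inputurl.replace("\\", "/")
--     #replace all multiple occurance of /
--     res = ""
--     for i in range(0, len(inputurl)):
--         ele = inputurl[i]
--         if(ele != "/"):
--             res += ele
--         elif(ele == "/" and i == 0):
--             res += ele
--         elif(ele == "/"):
--             pre = inputurl[i-1]
--             if(pre == "/"):
--                 #do nothing
--                 pass
--             else:
--                 res += ele
--         else:
--             res += ele
--
--     return res
-- ===== SOURCE B (Python) =====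
-- def valiurl(inputurl):
--     s = inputurl.replace("\\", "/")
--     out = []
--     i, n = 0, len(s)
--     while i < n:
--         c = s[i]
--         out.append(c)
--         i += 1
--         if c == "/":
--             while i < n and s[i] == "/":
--                 i += 1
--     return "".join(out)
-- ===== Notes on version B (the rewrite author's own statement) =====
-- stated objective: simpler
-- what changed: B replaces A's indexed char-by-char loop with previous-character lookback and a four-branch if-chain by a run-skipping scan: it emits each character, and after emitting a '/' skips the whole remaining run of slashes, needing no index lookback.
import Mathlib
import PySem

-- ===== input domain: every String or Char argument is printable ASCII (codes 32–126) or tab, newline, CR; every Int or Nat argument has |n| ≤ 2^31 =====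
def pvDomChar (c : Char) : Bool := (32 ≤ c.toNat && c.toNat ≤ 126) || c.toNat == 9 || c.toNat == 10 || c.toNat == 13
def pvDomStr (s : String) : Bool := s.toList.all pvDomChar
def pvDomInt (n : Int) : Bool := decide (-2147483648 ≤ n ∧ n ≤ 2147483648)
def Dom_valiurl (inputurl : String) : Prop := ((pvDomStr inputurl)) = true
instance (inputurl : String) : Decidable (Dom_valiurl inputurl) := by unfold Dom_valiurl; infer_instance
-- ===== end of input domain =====

-- B collapses duplicate slashes by a run-skipping scan instead of A's indexed loop with
-- previous-character lookback; same return value, objective: simpler.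

-- ===== PORT A =====
-- literal transliteration of A: replace backslashes, then for i in range(len): keep s[i]
-- unless it is '/', i != 0 and s[i-1] is '/'. Python's str accumulation is done on List Char,
-- rebuilt with String.mk at the end (exact: Python str = list of code points).
def valiurl (inputurl : String) : String :=
  let t := (PySem.Str.replace inputurl "\\" "/").toList
  let res := (PySem.List.pyRange 0 (t.length : Int) 1).foldl
    (fun res i =>
      let ele := PySem.List.pyGetD t i ' '   -- i is always in range here, so the default is never used
      if ele ≠ '/' then res ++ [ele]
      else if ele = '/' ∧ i = 0 then res ++ [ele]
      else if ele = '/' then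
        let pre := PySem.List.pyGetD t (i - 1) ' '
        if pre = '/' then res else res ++ [ele]
      else res ++ [ele]) ([] : List Char)
  String.mk res

-- ===== PORT B =====
-- B's while loop over the suffix of s: emit the head; if it was '/', skip the rest of the slash run.
def bGo : List Char → List Char
  | [] => []
  | c :: cs =>
    if c = '/' then '/' :: bGo (cs.dropWhile (fun x => x == '/'))
    else c :: bGo cs
termination_by l => l.length
decreasing_by
  · simpa using Nat.lt_succ_of_le (List.length_dropWhile_le _ cs)
  · simp

def valiurl_alt (inputurl : String) : String :=
  String.mk (bGo (PySem.Str.replace inputurl "\\" "/").toList)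

-- ===== PRECONDITION & SPEC =====
def Spec_valiurl (inputurl : String) (out : String) : Prop := out = valiurl_alt inputurl
instance (inputurl : String) (out : String) : Decidable (Spec_valiurl inputurl out) := by unfold Spec_valiurl; infer_instance

-- ===== CLAIM (what is proved, stated in full; the proofs are below) =====
def Claim_equal_valiurl : Prop := ∀ (inputurl : String), Dom_valiurl inputurl → Spec_valiurl inputurl (valiurl inputurl)

-- ===== LEMMAS AND PROOFS =====

-- which characters A keeps at index k of t (as a 0- or 1-element list)
def keptA (t : List Char) (k : Nat) : List Char :=
  if t.getD k ' ' = '/' ∧ k ≠ 0 ∧ t.getD (k - 1) ' ' = '/' then [] else [t.getD k ' ']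

-- A's scan in structural form: previous character is carried as an argument
def goA (p : Char) : List Char → List Char
  | [] => []
  | c :: cs => (if c = '/' ∧ p = '/' then [] else [c]) ++ goA c cs

-- A's indexed fold equals a flatMap of keptA over the index range
theorem foldA_eq_flatMap (t : List Char) :
    (PySem.List.pyRange 0 (t.length : Int) 1).foldl
      (fun res i =>
        let ele := PySem.List.pyGetD t i ' '
        if ele ≠ '/' then res ++ [ele]
        else if ele = '/' ∧ i = 0 then res ++ [ele]
        else if ele = '/' then
          let pre := PySem.List.pyGetD t (i - 1) ' '
          if pre = '/' then res else res ++ [ele]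
        else res ++ [ele]) ([] : List Char)
      = (List.range t.length).flatMap (keptA t) := by
  rw [PySem.List.pyRange_one, List.foldl_map]
  have hstep : ∀ (res : List Char) (k : Nat),
      (fun res (i : Int) =>
        let ele := PySem.List.pyGetD t i ' '
        if ele ≠ '/' then res ++ [ele]
        else if ele = '/' ∧ i = 0 then res ++ [ele]
        else if ele = '/' then
          let pre := PySem.List.pyGetD t (i - 1) ' '
          if pre = '/' then res else res ++ [ele]
        else res ++ [ele]) res ((0 : Int) + (k : Nat))
      = res ++ keptA t k := by
    intro res k
    by_cases h0 : k = 0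
    · subst h0
      by_cases h1 : t[0]?.getD ' ' = '/'
      · simp [keptA, PySem.List.pyGetD_zero, h1]
      · simp [keptA, PySem.List.pyGetD_zero, h1]
    · have hk1 : ((k : Int) - 1) = ((k - 1 : Nat) : Int) := by omega
      have hkz : ((k : Int) ≠ 0) := by exact_mod_cast h0
      by_cases h1 : t[k]?.getD ' ' = '/'
      · by_cases h2 : t[k - 1]?.getD ' ' = '/'
        · simp [keptA, h1, h2, h0, hkz, hk1]
        · simp [keptA, h1, h2, h0, hkz, hk1]
      · simp [keptA, h1, h0, hk1]
  have hfun : (fun (res : List Char) (k : Nat) =>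
      (fun res (i : Int) =>
        let ele := PySem.List.pyGetD t i ' '
        if ele ≠ '/' then res ++ [ele]
        else if ele = '/' ∧ i = 0 then res ++ [ele]
        else if ele = '/' then
          let pre := PySem.List.pyGetD t (i - 1) ' '
          if pre = '/' then res else res ++ [ele]
        else res ++ [ele]) res ((0 : Int) + (k : Nat)))
      = fun res k => res ++ keptA t k := by
    funext res k
    exact hstep res k
  rw [hfun, PySem.List.foldl_append_eq_flatMap]
  simp

-- the flatMap over shifted indices is goA with the previous char carried along
theorem flatMap_shift_eq_goA (cs : List Char) (p : Char) :
    (List.range cs.length).flatMap (fun i => keptA (p :: cs) (i + 1)) = goA p cs := by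
  induction cs generalizing p with
  | nil => simp [goA]
  | cons c cs ih =>
    rw [List.length_cons, List.range_succ_eq_map, List.flatMap_cons, List.flatMap_map]
    have h0 : keptA (p :: c :: cs) (0 + 1) = (if c = '/' ∧ p = '/' then [] else [c]) := by
      by_cases h1 : c = '/' <;> by_cases h2 : p = '/' <;> simp [keptA, h1, h2]
    have hs : (fun i => keptA (p :: c :: cs) (Nat.succ i + 1))
        = fun i => keptA (c :: cs) (i + 1) := by
      funext i
      simp [keptA, List.getD]
    rw [h0, hs, ih c, goA]

theorem flatMap_eq_headGoA (t : List Char) :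
    (List.range t.length).flatMap (keptA t) =
      (match t with
       | [] => []
       | c :: cs => c :: goA c cs) := by
  cases t with
  | nil => simp
  | cons c cs =>
    rw [List.length_cons, List.range_succ_eq_map, List.flatMap_cons, List.flatMap_map]
    have h0 : keptA (c :: cs) 0 = [c] := by simp [keptA]
    have hs : (fun i => keptA (c :: cs) (Nat.succ i)) = fun i => keptA (c :: cs) (i + 1) := by
      funext i; rfl
    rw [h0, hs, flatMap_shift_eq_goA cs c]
    rfl

-- goA agrees with bGo: after a slash it is bGo of the suffix with the slash run dropped
theorem goA_eq_bGo (cs : List Char) (p : Char) :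
    goA p cs = if p = '/' then bGo (cs.dropWhile (fun x => x == '/')) else bGo cs := by
  induction cs generalizing p with
  | nil => simp [goA, bGo]
  | cons c cs ih =>
    by_cases hp : p = '/'
    · by_cases hc : c = '/'
      · subst hp; subst hc
        simp only [goA, and_self, if_true, List.nil_append, if_true, List.dropWhile_cons,
          beq_self_eq_true, if_true]
        rw [ih '/']
        simp
      · simp only [goA, hp, hc, and_true, List.dropWhile_cons]
        have : (c == '/') = false := by simp [hc]
        rw [this]
        simp only [Bool.false_eq_true, if_false, bGo, if_neg hc]
        rw [ih c]
        simp [hc]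
    · simp only [goA, hp, and_false, if_false, List.singleton_append]
      by_cases hc : c = '/'
      · subst hc
        simp only [bGo, if_pos rfl]
        rw [ih '/']
        simp
      · simp only [bGo, if_neg hc]
        rw [ih c]
        simp [hc]

theorem headGoA_eq_bGo (t : List Char) :
    (match t with
     | [] => []
     | c :: cs => c :: goA c cs) = bGo t := by
  cases t with
  | nil => simp [bGo]
  | cons c cs =>
    by_cases hc : c = '/'
    · subst hc
      simp only [bGo, if_pos rfl]
      rw [goA_eq_bGo cs '/']
      simp
    · simp only [bGo, if_neg hc]
      rw [goA_eq_bGo cs c]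
      simp [hc]

-- ===== VERDICT (by name: the statement is the Claim_ definition above) =====
theorem valiurl_spec : Claim_equal_valiurl := by
  intro inputurl _
  show valiurl inputurl = valiurl_alt inputurl
  unfold valiurl valiurl_alt
  simp only [foldA_eq_flatMap, flatMap_eq_headGoA, headGoA_eq_bGo]
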